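-- pv_equiv track=rewrite | github.com/bwlight/NetGrid | tools/master_builders/master_move_learnset.py | build_learnset
-- ===== SOURCE A (Python) =====
-- def build_learnset(ability_names, cyberkin):
--     learnset = {}
--
--     for ability in ability_names:
--         learnset[ability] = []
--
--         for ck_name, moves in cyberkin.items():
--             if ability in moves:
--                 learnset[ability].append(ck_name)
--
--         learnset[ability].sort()
--
--     return learnset
-- ===== SOURCE B (Python) =====
-- def build_learnset(ability_names, cyberkin):
--     inv = {}
--     for ck_name, moves in cyberkin.items():
--         for move in dict.fromkeys(moves):
--             inv.setdefault(move, []).append(ck_name)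
--     result = {}
--     for ability in ability_names:
--         result[ability] = sorted(inv.get(ability, []))
--     return result
-- ===== Notes on version B (the rewrite author's own statement) =====
-- stated objective: faster
-- what changed: Instead of scanning all cyberkin once per ability, B builds a full inverted index move->list of cyberkin in one pass with setdefault (no pre-seeded ability dict, no membership test in the inner loop), then assembles the result by looking each ability up in the index and sorting.
import Mathlib
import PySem

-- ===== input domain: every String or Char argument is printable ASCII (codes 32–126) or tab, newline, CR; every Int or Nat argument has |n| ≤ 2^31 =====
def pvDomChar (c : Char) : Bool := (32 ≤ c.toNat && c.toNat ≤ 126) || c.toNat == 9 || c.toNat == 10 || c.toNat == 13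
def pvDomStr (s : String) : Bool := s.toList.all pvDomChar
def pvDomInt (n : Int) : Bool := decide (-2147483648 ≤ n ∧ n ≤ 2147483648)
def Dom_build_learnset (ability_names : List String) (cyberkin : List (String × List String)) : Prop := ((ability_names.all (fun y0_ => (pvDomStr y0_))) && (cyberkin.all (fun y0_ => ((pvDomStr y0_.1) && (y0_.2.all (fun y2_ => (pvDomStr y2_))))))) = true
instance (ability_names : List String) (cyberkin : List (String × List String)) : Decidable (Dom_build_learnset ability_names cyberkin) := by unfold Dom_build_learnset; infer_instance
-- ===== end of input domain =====

-- B replaces A's per-ability scan of all cyberkin with one inversion pass building a full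
-- move->cyberkin index, then a lookup-and-sort pass over the abilities (objective: faster;
-- return value only).

-- ===== PORT A =====
-- literal port of A: for each ability insert [], scan all cyberkin appending matching
-- ck names, then sort that ability's list in place
def build_learnset (ability_names : List String) (cyberkin : List (String × List String)) : List (String × List String) :=
  (ability_names.foldl
    (fun learnset ability =>
      let learnset := learnset.insert ability ([] : List String)
      let learnset := cyberkin.foldl
        (fun learnset p =>
          if p.2.contains ability then
            learnset.modify ability [] (fun l => l ++ [p.1])
          else learnset)
        learnset
      learnset.modify ability [] (fun l => PySem.List.sorted l (fun x => x) false))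
    PySem.Dict.empty).items

-- ===== PORT B =====
-- literal port of Source B: build the inverted index move -> [ck names] over ALL moves
-- (dict.fromkeys dedupes each move list; setdefault(...).append = modify with default []),
-- then build the result dict by looking up each ability and sorting
def build_learnset_alt (ability_names : List String) (cyberkin : List (String × List String)) : List (String × List String) :=
  let inv := cyberkin.foldl
    (fun inv p =>
      (PySem.List.dedup p.2).foldl
        (fun inv move => inv.modify move [] (fun l => l ++ [p.1]))
        inv)
    PySem.Dict.empty
  (ability_names.foldl
    (fun result ability =>
      result.insert ability (PySem.List.sorted (inv.getD ability []) (fun x => x) false))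
    PySem.Dict.empty).items

-- ===== PRECONDITION & SPEC =====
def Spec_build_learnset (ability_names : List String) (cyberkin : List (String × List String)) (out : List (String × List String)) : Prop := out = build_learnset_alt ability_names cyberkin
instance (ability_names : List String) (cyberkin : List (String × List String)) (out : List (String × List String)) : Decidable (Spec_build_learnset ability_names cyberkin out) := by unfold Spec_build_learnset; infer_instance

-- ===== CLAIM (what is proved, stated in full; the proofs are below) =====
def Claim_equal_build_learnset : Prop := ∀ (ability_names : List String) (cyberkin : List (String × List String)), Dom_build_learnset ability_names cyberkin → Spec_build_learnset ability_names cyberkin (build_learnset ability_names cyberkin)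

-- ===== LEMMAS AND PROOFS =====

-- a dict whose items are the keys s each paired with f of the key
def pvE (s : List String) (f : String → List String) : PySem.Dict String (List String) :=
  PySem.Dict.mk (s.map (fun a => (a, f a)))

-- the ck names (in cyberkin order) whose move list contains a
def pvVal (cyberkin : List (String × List String)) (a : String) : List String :=
  (cyberkin.filter (fun p => p.2.contains a)).map Prod.fst

theorem pvE_contains (s : List String) (f : String → List String) (a : String) :
    (pvE s f).contains a = decide (a ∈ s) := by
  unfold pvE PySem.Dict.contains
  induction s with
  | nil => simp
  | cons b t ih =>
    simp only [List.map_cons, List.any_cons, ih, List.mem_cons]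
    by_cases hba : b = a
    · simp [hba]
    · simp [hba, Ne.symm hba]

theorem pvE_insert (s : List String) (f : String → List String) (a : String) :
    (pvE s f).insert a (f a) = pvE (PySem.Set.add s a) f := by
  by_cases hmem : a ∈ s
  · have hc : (pvE s f).contains a = true := by
      rw [pvE_contains]; exact decide_eq_true hmem
    have : PySem.Set.add s a = s := by simp [PySem.Set.add, hmem]
    rw [this]
    apply PySem.Dict.ext
    rw [PySem.Dict.items_insert_of_contains _ _ hc]
    unfold pvE
    simp only [List.map_map]
    exact List.map_congr_left (fun x hx => by
      by_cases hxa : x = a <;> simp [Function.comp, hxa])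
  · have hc : (pvE s f).contains a = false := by
      rw [pvE_contains]; simpa using hmem
    have : PySem.Set.add s a = s ++ [a] := by simp [PySem.Set.add, hmem]
    rw [this]
    apply PySem.Dict.ext
    rw [PySem.Dict.items_insert_of_not_contains _ _ hc]
    simp [pvE]

theorem foldl_insert_fun (h : String → List String) (l : List String) (s : List String) :
    l.foldl (fun d a => d.insert a (h a)) (pvE s h) = pvE (PySem.Set.update s l) h := by
  induction l generalizing s with
  | nil => rfl
  | cons a l ih =>
    simp only [List.foldl_cons]
    rw [pvE_insert, ih]
    rfl

theorem innerA (a : String) (c : List (String × List String))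
    (d : PySem.Dict String (List String)) (v : List String) :
    c.foldl
      (fun learnset p =>
        if p.2.contains a then learnset.modify a [] (fun l => l ++ [p.1]) else learnset)
      (d.insert a v)
    = d.insert a (v ++ pvVal c a) := by
  induction c generalizing v with
  | nil => simp [pvVal]
  | cons p c ih =>
    simp only [List.foldl_cons]
    by_cases hp : p.2.contains a
    · rw [if_pos hp]
      have : (d.insert a v).modify a [] (fun l => l ++ [p.1]) = d.insert a (v ++ [p.1]) := by
        unfold PySem.Dict.modify
        rw [PySem.Dict.getD_insert_self, PySem.Dict.insert_insert_self]
      rw [this, ih]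
      have hp' : a ∈ p.2 := by simpa using hp
      simp [pvVal, hp']
    · rw [if_neg hp, ih]
      have hp' : a ∉ p.2 := by simpa using hp
      simp [pvVal, hp']

theorem A_char (ability_names : List String) (cyberkin : List (String × List String)) :
    build_learnset ability_names cyberkin
    = ((PySem.Set.ofList ability_names).map
        (fun a => (a, PySem.List.sorted (pvVal cyberkin a) (fun x => x) false))) := by
  unfold build_learnset
  have hstep : (fun (learnset : PySem.Dict String (List String)) (ability : String) =>
      let learnset := learnset.insert ability ([] : List String)
      let learnset := cyberkin.foldl
        (fun learnset p =>
          if p.2.contains ability then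
            learnset.modify ability [] (fun l => l ++ [p.1])
          else learnset)
        learnset
      learnset.modify ability [] (fun l => PySem.List.sorted l (fun x => x) false))
    = fun learnset ability =>
        learnset.insert ability (PySem.List.sorted (pvVal cyberkin ability) (fun x => x) false) := by
    funext d a
    simp only []
    rw [innerA a cyberkin d []]
    unfold PySem.Dict.modify
    rw [PySem.Dict.getD_insert_self, PySem.Dict.insert_insert_self]
    simp
  rw [hstep]
  have h0 : (PySem.Dict.empty : PySem.Dict String (List String))
      = pvE [] (fun a => PySem.List.sorted (pvVal cyberkin a) (fun x => x) false) := rfl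
  rw [h0, foldl_insert_fun]
  rfl

-- the flattened (move, ck) pair list B's inversion pass processes
def pvPairs (cyberkin : List (String × List String)) : List (String × String) :=
  cyberkin.flatMap (fun p => (PySem.List.dedup p.2).map (fun m => (m, p.1)))

theorem pvPairs_filter (cyberkin : List (String × List String)) (a : String) :
    ((pvPairs cyberkin).filter (fun q => q.1 == a)).map (·.2) = pvVal cyberkin a := by
  induction cyberkin with
  | nil => rfl
  | cons p c ih =>
    simp only [pvPairs, List.flatMap_cons, List.filter_append, List.map_append] at *
    rw [ih]
    have hcomp : ((PySem.List.dedup p.2).map (fun m => (m, p.1))).filter (fun q => q.1 == a)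
        = ((PySem.List.dedup p.2).filter (fun m => m == a)).map (fun m => (m, p.1)) := by
      rw [List.filter_map]
      rfl
    have hhead : ((((PySem.List.dedup p.2).map (fun m => (m, p.1))).filter
        (fun q => q.1 == a)).map (·.2))
        = if p.2.contains a then [p.1] else [] := by
      by_cases hm : a ∈ p.2
      · have hda : a ∈ PySem.List.dedup p.2 := by
          simpa [PySem.List.mem_dedup] using hm
        have hfilter : (PySem.List.dedup p.2).filter (fun m => m == a) = [a] := by
          have hcnt := List.count_eq_one_of_mem (PySem.List.nodup_dedup p.2) hda
          rw [List.filter_beq, hcnt]; rfl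
        rw [hcomp, hfilter, if_pos (by simpa using hm)]
        rfl
      · have hfilter : (PySem.List.dedup p.2).filter (fun m => m == a) = [] := by
          rw [List.filter_eq_nil_iff]
          intro m hmem
          simp only [beq_iff_eq]
          intro h
          exact hm ((PySem.List.mem_dedup _ _).mp (h ▸ hmem))
        rw [hcomp, hfilter, if_neg (by simpa using hm)]
        rfl
    rw [hhead]
    by_cases hc : a ∈ p.2 <;> simp [pvVal, List.contains_eq_mem, hc]

theorem B_char (ability_names : List String) (cyberkin : List (String × List String)) :
    build_learnset_alt ability_names cyberkin
    = ((PySem.Set.ofList ability_names).map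
        (fun a => (a, PySem.List.sorted (pvVal cyberkin a) (fun x => x) false))) := by
  simp only [build_learnset_alt]
  have hinv : cyberkin.foldl
      (fun inv p =>
        (PySem.List.dedup p.2).foldl
          (fun inv move => inv.modify move [] (fun l => l ++ [p.1]))
          inv)
      PySem.Dict.empty
      = (pvPairs cyberkin).foldl
          (fun d q => d.modify q.1 [] (fun l => l ++ [q.2])) PySem.Dict.empty := by
    rw [pvPairs, List.foldl_flatMap]
    congr 1
    funext d p
    rw [List.foldl_map]
  rw [hinv]
  have hget : ∀ a, ((pvPairs cyberkin).foldl
      (fun d q => d.modify q.1 [] (fun l => l ++ [q.2])) PySem.Dict.empty).getD a []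
      = pvVal cyberkin a := by
    intro a
    rw [PySem.Dict.getD_foldl_modify_append, pvPairs_filter]
    simp
  simp only [hget]
  have h0 : (PySem.Dict.empty : PySem.Dict String (List String))
      = pvE [] (fun a => PySem.List.sorted (pvVal cyberkin a) (fun x => x) false) := rfl
  rw [h0, foldl_insert_fun]
  rfl

-- ===== VERDICT (by name: the statement is the Claim_ definition above) =====
theorem build_learnset_spec : Claim_equal_build_learnset := by
  intro ability_names cyberkin _
  unfold Spec_build_learnset
  rw [A_char, B_char]
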